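-- pv_equiv track=rewrite | github.com/mingo2/Calcolo-automatico-per-la-meccanica-dei-solidi | BiforcazioneFlessibile.py | PU_
-- ===== SOURCE A (Python) =====
-- def P_(Pr):
--     P = []
--     n = len(Pr)
--     for i in range(n):
--         P.append([])
--         for j in range(len(Pr[i])):
--             P[-1].append(Pr[i][j]+str(i+1))
--     return P
--
-- def punti_numerati(Pr):
--     n = len(Pr)
--     puntinumerati = []
--     for i in range(n):
--         for j in range(len(Pr[i])):
--             puntinumerati.append(Pr[i][j]+str(i+1))
--     return puntinumerati
--
-- def PU_(Pr):
--     P  = P_(Pr)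
--     PU = []
--     for i in P:
--         PU.append([])
--         for j in i:
--             PU[-1].append(j)
--     puntinumerati = punti_numerati(Pr)
--     M1 = []
--     for i in puntinumerati:
--         M1.append(i[:-1])
--     M2 = []
--     for i in M1:
--         if M1.count(i) == 1:
--             M2.append(i)
--     n = len(Pr)
--     for i in range(n):
--         for j in range(len(PU[i])):
--             if PU[i][j][:-1] in M2:
--                 PU[i][j] = PU[i][j][:-1]
--     return PU
-- ===== SOURCE B (Python) =====
-- def PU_(Pr):
--     numbered = [p + str(i + 1) for i, row in enumerate(Pr) for p in row]
--     sp = sorted(s[:-1] for s in numbered)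
--     uniq = []
--     i = 0
--     n = len(sp)
--     while i < n:
--         j = i + 1
--         while j < n and sp[j] == sp[i]:
--             j += 1
--         if j == i + 1:
--             uniq.append(sp[i])
--         i = j
--     return [[((p + str(k + 1))[:-1] if (p + str(k + 1))[:-1] in uniq else p + str(k + 1))
--              for p in row] for k, row in enumerate(Pr)]
-- ===== Notes on version B (the rewrite author's own statement) =====
-- stated objective: faster
-- what changed: B flattens rows with one comprehension, SORTS the stripped-prefix list and detects unique prefixes in a single run-length walk over the sorted list (adjacent-equality scan), instead of A's four index loops and a quadratic repeated list.count over the prefix list; this is correct because sorting makes equal prefixes contiguous, so a prefix occurs exactly once iff its run has length 1.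
import Mathlib
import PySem

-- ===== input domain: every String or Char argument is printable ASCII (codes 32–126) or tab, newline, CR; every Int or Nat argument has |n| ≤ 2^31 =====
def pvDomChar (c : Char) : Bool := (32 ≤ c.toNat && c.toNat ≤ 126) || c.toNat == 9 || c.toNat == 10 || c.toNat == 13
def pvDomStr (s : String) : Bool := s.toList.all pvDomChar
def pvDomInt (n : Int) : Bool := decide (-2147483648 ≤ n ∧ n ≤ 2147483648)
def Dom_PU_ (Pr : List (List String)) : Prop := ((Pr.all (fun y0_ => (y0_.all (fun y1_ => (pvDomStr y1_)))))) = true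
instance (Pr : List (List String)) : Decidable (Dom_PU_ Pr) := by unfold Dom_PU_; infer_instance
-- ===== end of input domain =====

-- B flattens with one comprehension, sorts the stripped prefixes and finds unique ones by a single
-- run-length scan of the sorted list, replacing A's index loops and quadratic repeated list.count (faster, measured).


-- ===== PORT A =====
-- s[:-1]
def pvStrip (s : String) : String := PySem.Str.slice s none (some (-1))

-- helper P_ of the module, literal: index loops over range(n) / range(len(Pr[i]))
def pvP_ (Pr : List (List String)) : List (List String) :=
  (PySem.List.pyRange 0 (Pr.length : Int) 1).foldl (fun P i =>
    P ++ [(PySem.List.pyRange 0 ((PySem.List.pyGetD Pr i []).length : Int) 1).foldl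
      (fun r j => r ++ [PySem.List.pyGetD (PySem.List.pyGetD Pr i []) j "" ++ PySem.Int.toStr (i + 1)]) []]) []

-- helper punti_numerati of the module, literal
def pvPuntiNumerati (Pr : List (List String)) : List String :=
  (PySem.List.pyRange 0 (Pr.length : Int) 1).foldl (fun acc i =>
    (PySem.List.pyRange 0 ((PySem.List.pyGetD Pr i []).length : Int) 1).foldl
      (fun acc2 j => acc2 ++ [PySem.List.pyGetD (PySem.List.pyGetD Pr i []) j "" ++ PySem.Int.toStr (i + 1)]) acc) []

-- PU[i][j] = v : indices produced by range(len(..)) are always in range, so List.set is exact here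
def pvSet {α : Type} (xs : List α) (i : Int) (v : α) : List α := xs.set i.toNat v

def PU_ (Pr : List (List String)) : List (List String) :=
  let P := pvP_ Pr
  let PU := P.foldl (fun PU i => PU ++ [i.foldl (fun r j => r ++ [j]) []]) []
  let puntinumerati := pvPuntiNumerati Pr
  let M1 := puntinumerati.foldl (fun M1 i => M1 ++ [pvStrip i]) []
  let M2 := M1.foldl (fun M2 i => if M1.count i == 1 then M2 ++ [i] else M2) []
  (PySem.List.pyRange 0 (Pr.length : Int) 1).foldl (fun PU i =>
    (PySem.List.pyRange 0 ((PySem.List.pyGetD PU i []).length : Int) 1).foldl (fun PU j =>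
      if M2.contains (pvStrip (PySem.List.pyGetD (PySem.List.pyGetD PU i []) j "")) then
        pvSet PU i (pvSet (PySem.List.pyGetD PU i []) j
          (pvStrip (PySem.List.pyGetD (PySem.List.pyGetD PU i []) j "")))
      else PU) PU) PU

-- ===== PORT B =====
-- the run-length walk over the sorted prefix list: the inner 'while sp[j] == sp[i]' advance is the
-- takeWhile/dropWhile of the run at the front; a run of length 1 contributes its value
def pvUniqRuns : List String → List String
  | [] => []
  | x :: rest =>
      let run := rest.takeWhile (fun y => y == x)
      let rest' := rest.dropWhile (fun y => y == x)
      if run.isEmpty then x :: pvUniqRuns rest' else pvUniqRuns rest'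
termination_by l => l.length
decreasing_by
  all_goals
    have := List.length_dropWhile_le (fun y => y == x) rest
    simp only [List.length_cons]
    omega

def PU__alt (Pr : List (List String)) : List (List String) :=
  let numbered := (PySem.List.enumerate Pr 0).flatMap (fun p => p.2.map (fun q => q ++ PySem.Int.toStr (p.1 + 1)))
  let sp := PySem.List.sorted (numbered.map (fun s => pvStrip s)) (fun x => x) false
  let uniq := pvUniqRuns sp
  (PySem.List.enumerate Pr 0).map (fun p => p.2.map (fun q =>
    if uniq.contains (pvStrip (q ++ PySem.Int.toStr (p.1 + 1))) then
      pvStrip (q ++ PySem.Int.toStr (p.1 + 1))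
    else q ++ PySem.Int.toStr (p.1 + 1)))

-- ===== PRECONDITION & SPEC =====
def Spec_PU_ (Pr : List (List String)) (out : List (List String)) : Prop := out = PU__alt Pr
instance (Pr : List (List String)) (out : List (List String)) : Decidable (Spec_PU_ Pr out) := by unfold Spec_PU_; infer_instance

-- ===== CLAIM (what is proved, stated in full; the proofs are below) =====
def Claim_equal_PU_ : Prop := ∀ (Pr : List (List String)), Dom_PU_ Pr → Spec_PU_ Pr (PU_ Pr)

-- ===== LEMMAS AND PROOFS =====

-- the flattened numbered-point list, its prefix list, and the unique-prefix list
def pvNum (Pr : List (List String)) : List String :=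
  (PySem.List.enumerate Pr 0).flatMap (fun p => p.2.map (fun q => q ++ PySem.Int.toStr (p.1 + 1)))
def pvM1 (Pr : List (List String)) : List String := (pvNum Pr).map pvStrip
def pvM2 (Pr : List (List String)) : List String :=
  (pvM1 Pr).filter (fun x => (pvM1 Pr).count x == 1)
def pvTweak (M2 : List String) (s : String) : String :=
  if M2.contains (pvStrip s) then pvStrip s else s

-- a fold over range(len(xs)) whose body uses both the index i and xs[i] is a fold over enumerate(xs)
theorem pv_foldl_range_getD {α β : Type} (xs : List α) (d : α) (g : β → Int → α → β) (init : β) :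
    (PySem.List.pyRange 0 (xs.length : Int) 1).foldl
      (fun acc i => g acc i (PySem.List.pyGetD xs i d)) init
    = (PySem.List.enumerate xs 0).foldl (fun acc p => g acc p.1 p.2) init := by
  rw [PySem.List.enumerate_eq_map_pyRange xs d, List.foldl_map, PySem.List.len_eq]

theorem pv_set_self {α : Type} (xs : List α) (n : Nat) (v : α) (h : xs[n]? = some v) :
    xs.set n v = xs := by
  have hlt : n < xs.length := (List.getElem?_eq_some_iff.mp h).1
  apply List.ext_getElem (by simp)
  intro i h1 h2
  rcases eq_or_ne i n with rfl | hne
  · simpa using ((List.getElem?_eq_some_iff.mp h).2).symm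
  · simp [List.getElem_set_ne hne.symm]

theorem pvP_eq (Pr : List (List String)) :
    pvP_ Pr = (PySem.List.enumerate Pr 0).map (fun p => p.2.map (fun q => q ++ PySem.Int.toStr (p.1 + 1))) := by
  unfold pvP_
  rw [pv_foldl_range_getD Pr []
    (fun acc i row => acc ++ [(PySem.List.pyRange 0 (row.length : Int) 1).foldl
      (fun r j => r ++ [PySem.List.pyGetD row j "" ++ PySem.Int.toStr (i + 1)]) []])]
  rw [PySem.List.foldl_append_singleton_eq_map
    (fun p : Int × List String => (PySem.List.pyRange 0 (p.2.length : Int) 1).foldl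
      (fun r j => r ++ [PySem.List.pyGetD p.2 j "" ++ PySem.Int.toStr (p.1 + 1)]) [])]
  rw [List.nil_append]
  apply List.map_congr_left
  intro p _
  rw [← PySem.List.len_eq,
    PySem.List.foldl_pyRange_zero_pyGetD p.2 ""
      (fun r x => r ++ [x ++ PySem.Int.toStr (p.1 + 1)]) [],
    PySem.List.foldl_append_singleton_eq_map, List.nil_append]

theorem pvPunti_eq (Pr : List (List String)) : pvPuntiNumerati Pr = pvNum Pr := by
  unfold pvPuntiNumerati pvNum
  rw [pv_foldl_range_getD Pr []
    (fun acc i row => (PySem.List.pyRange 0 (row.length : Int) 1).foldl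
      (fun a2 j => a2 ++ [PySem.List.pyGetD row j "" ++ PySem.Int.toStr (i + 1)]) acc)]
  have hb : (fun (acc : List String) (p : Int × List String) =>
      (PySem.List.pyRange 0 (p.2.length : Int) 1).foldl
        (fun a2 j => a2 ++ [PySem.List.pyGetD p.2 j "" ++ PySem.Int.toStr (p.1 + 1)]) acc)
      = fun acc p => acc ++ p.2.map (fun q => q ++ PySem.Int.toStr (p.1 + 1)) := by
    funext acc p
    rw [← PySem.List.len_eq,
      PySem.List.foldl_pyRange_zero_pyGetD p.2 ""
        (fun a2 x => a2 ++ [x ++ PySem.Int.toStr (p.1 + 1)]) acc,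
      PySem.List.foldl_append_singleton_eq_map]
  rw [hb, PySem.List.foldl_append_eq_flatMap, List.nil_append]

theorem pv_contains_M2 (M1 : List String) (q : String) :
    (M1.filter (fun x => M1.count x == 1)).contains q = (M1.count q == 1) := by
  by_cases h : M1.count q = 1
  · have hq : q ∈ M1 := List.count_pos_iff.mp (by omega)
    simp [List.contains_eq_mem, List.mem_filter, h, hq]
  · simp [List.contains_eq_mem, List.mem_filter, h]

-- x does not survive its own run: the dropWhile part of a sorted list contains no further x
theorem pv_x_not_drop (x : String) (rest : List String)
    (hpr : rest.Pairwise (· ≤ ·)) (hxle : ∀ y ∈ rest, x ≤ y) :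
    x ∉ rest.dropWhile (fun y => y == x) := by
  cases hdw : rest.dropWhile (fun y => y == x) with
  | nil => simp
  | cons h t =>
    have hhne : h ≠ x := by
      have := List.head?_dropWhile_not (fun y => y == x) rest
      rw [hdw] at this
      simpa using this
    intro hx
    have hsub : (h :: t).Sublist rest := hdw ▸ List.dropWhile_sublist _
    have hpr' : (h :: t).Pairwise (· ≤ ·) := hpr.sublist hsub
    rcases (by simpa using hx : x = h ∨ x ∈ t) with heq | hxt
    · exact hhne heq.symm
    · have hle1 : h ≤ x := (List.pairwise_cons.mp hpr').1 x hxt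
      have hle2 : x ≤ h := hxle h (hsub.subset (by simp))
      exact hhne (le_antisymm hle1 hle2)

-- membership characterisation of the run-length scan on a sorted (Pairwise ≤) list:
-- a value gets collected iff it occurs exactly once
theorem pvUniqRuns_mem (q : String) :
    ∀ (fuel : Nat) (l : List String), l.length ≤ fuel → l.Pairwise (· ≤ ·) →
    (q ∈ pvUniqRuns l ↔ l.count q = 1) := by
  intro fuel
  induction fuel with
  | zero =>
    intro l hl _
    have : l = [] := List.eq_nil_of_length_eq_zero (by omega)
    subst this
    simp [pvUniqRuns]
  | succ fuel ih =>
    intro l hl hp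
    match l with
    | [] => simp [pvUniqRuns]
    | x :: rest =>
      rw [pvUniqRuns]
      have hsplit : rest.takeWhile (fun y => y == x) ++ rest.dropWhile (fun y => y == x) = rest :=
        List.takeWhile_append_dropWhile
      have hrunx : ∀ y ∈ rest.takeWhile (fun y => y == x), y = x := by
        intro y hy
        have := List.mem_takeWhile_imp hy
        simpa using this
      have hpr : rest.Pairwise (· ≤ ·) := (List.pairwise_cons.mp hp).2
      have hxle : ∀ y ∈ rest, x ≤ y := (List.pairwise_cons.mp hp).1
      have hpr' : (rest.dropWhile (fun y => y == x)).Pairwise (· ≤ ·) :=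
        hpr.sublist (List.dropWhile_sublist _)
      have hxnot : x ∉ rest.dropWhile (fun y => y == x) := pv_x_not_drop x rest hpr hxle
      have hIH := ih (rest.dropWhile (fun y => y == x)) (by
          have h1 := List.length_dropWhile_le (fun y => y == x) rest
          simp at hl; omega) hpr'
      have hcnt : rest.count q
          = (rest.takeWhile (fun y => y == x)).count q
            + (rest.dropWhile (fun y => y == x)).count q := by
        conv_lhs => rw [← hsplit]
        rw [List.count_append]
      by_cases hq : q = x
      · subst hq
        have hc0 : (rest.dropWhile (fun y => y == q)).count q = 0 := List.count_eq_zero.mpr hxnot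
        have hcr : (rest.takeWhile (fun y => y == q)).count q
            = (rest.takeWhile (fun y => y == q)).length :=
          List.count_eq_length.mpr (fun y hy => ((hrunx y hy).symm : q = y))
        rw [List.count_cons_self, hcnt, hc0, hcr]
        by_cases hr : (rest.takeWhile (fun y => y == q)).isEmpty
        · have h0 : (rest.takeWhile (fun y => y == q)).length = 0 := by
            simpa [List.isEmpty_iff_length_eq_zero] using hr
          simp [hr, h0]
        · have h0 : (rest.takeWhile (fun y => y == q)).length ≠ 0 := by
            intro h0
            exact hr (by simpa [List.isEmpty_iff_length_eq_zero] using h0)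
          simp only [hr, Bool.false_eq_true, if_false, hIH, hc0]
          omega
      · have hcr : (rest.takeWhile (fun y => y == x)).count q = 0 :=
          List.count_eq_zero.mpr (fun hy => hq (hrunx q hy))
        have hq' : x ≠ q := fun h => hq h.symm
        rw [List.count_cons_of_ne hq', hcnt, hcr, Nat.zero_add]
        by_cases hr : (rest.takeWhile (fun y => y == x)).isEmpty <;> simp [hr, hq, hIH]

-- ===== VERDICT (by name: the statement is the Claim_ definition above): helper pieces first ====

-- inner mutation loop: for j in range(len(PU[i])): possibly PU[i][j] = PU[i][j][:-1]
theorem pv_innerAux (M2 : List String) (i : Nat) :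
    ∀ (fuel j m : Nat) (PU : List (List String)) (row : List String),
    fuel = m - j → PU[i]? = some row → row.length = m → j ≤ m →
    (PySem.List.pyRange (j : Int) (m : Int) 1).foldl
      (fun PU jj =>
        if M2.contains (pvStrip (PySem.List.pyGetD (PySem.List.pyGetD PU (i : Int) []) jj "")) then
          pvSet PU (i : Int) (pvSet (PySem.List.pyGetD PU (i : Int) []) jj
            (pvStrip (PySem.List.pyGetD (PySem.List.pyGetD PU (i : Int) []) jj "")))
        else PU) PU
    = PU.set i (row.take j ++ (row.drop j).map (pvTweak M2)) := by
  intro fuel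
  induction fuel with
  | zero =>
    intro j m PU row hf hi hm hj
    have hjm : j = m := by omega
    subst hjm
    rw [PySem.List.pyRange_one_eq_nil le_rfl]
    simp only [List.foldl_nil]
    rw [← hm, List.take_length, List.drop_length, List.map_nil, List.append_nil,
      pv_set_self _ _ _ hi]
  | succ fuel ih =>
    intro j m PU row hf hi hm hj
    by_cases hjm : j = m
    · subst hjm
      rw [PySem.List.pyRange_one_eq_nil le_rfl]
      simp only [List.foldl_nil]
      rw [← hm, List.take_length, List.drop_length, List.map_nil, List.append_nil,
        pv_set_self _ _ _ hi]
    · have hjlt : j < m := by omega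
      have hjr : j < row.length := by omega
      have hilt : i < PU.length := (List.getElem?_eq_some_iff.mp hi).1
      have hrow : row = PU[i] := ((List.getElem?_eq_some_iff.mp hi).2).symm
      rw [PySem.List.pyRange_one_cons (by exact_mod_cast hjlt)]
      rw [List.foldl_cons]
      have hgi : PySem.List.pyGetD PU (i : Int) [] = row := by
        rw [PySem.List.pyGetD_natCast, List.getD_eq_getElem _ _ hilt, hrow]
      have hgj : PySem.List.pyGetD row (j : Int) "" = row[j] := by
        rw [PySem.List.pyGetD_natCast, List.getD_eq_getElem _ _ hjr]
      have hstep :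
          (if M2.contains (pvStrip (PySem.List.pyGetD (PySem.List.pyGetD PU (i : Int) []) (j:Int) "")) then
            pvSet PU (i : Int) (pvSet (PySem.List.pyGetD PU (i : Int) []) (j:Int)
              (pvStrip (PySem.List.pyGetD (PySem.List.pyGetD PU (i : Int) []) (j:Int) "")))
          else PU)
          = PU.set i (row.set j (pvTweak M2 row[j])) := by
        rw [hgi, hgj]
        unfold pvTweak
        by_cases hc : M2.contains (pvStrip row[j]) = true
        · simp only [hc, if_true]
          unfold pvSet
          simp
        · simp only [Bool.not_eq_true] at hc
          simp only [hc, Bool.false_eq_true, if_false]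
          rw [pv_set_self row j _ (by simp [hjr]),
            pv_set_self PU i row hi]
      rw [hstep]
      have hcast : ((j : Int) + 1) = ((j + 1 : Nat) : Int) := by push_cast; ring
      rw [hcast]
      set row' := row.set j (pvTweak M2 row[j]) with hrow'
      have h1 : (PU.set i row')[i]? = some row' := List.getElem?_set_self hilt
      have h2 : row'.length = m := by simp [hrow', hm]
      have := ih (j+1) m (PU.set i row') row' (by omega) h1 h2 (by omega)
      rw [this, List.set_set]
      congr 1
      have htake : row'.take (j+1) = row.take j ++ [pvTweak M2 row[j]] := by
        rw [hrow', List.set_eq_take_cons_drop _ hjr, List.take_append]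
        simp [List.length_take, Nat.min_eq_left hjr.le]
      have hdrop : row'.drop (j+1) = row.drop (j+1) := by
        rw [hrow', List.drop_set_of_lt (by omega)]
      rw [htake, hdrop, List.append_assoc, List.singleton_append]
      rw [List.drop_eq_getElem_cons hjr, List.map_cons]

-- outer mutation loop
theorem pv_outerAux (M2 : List String) :
    ∀ (fuel k n : Nat) (PU : List (List String)),
    fuel = n - k → PU.length = n → k ≤ n →
    (PySem.List.pyRange (k : Int) (n : Int) 1).foldl
      (fun PU i =>
        (PySem.List.pyRange 0 ((PySem.List.pyGetD PU i []).length : Int) 1).foldl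
          (fun PU j =>
            if M2.contains (pvStrip (PySem.List.pyGetD (PySem.List.pyGetD PU i []) j "")) then
              pvSet PU i (pvSet (PySem.List.pyGetD PU i []) j
                (pvStrip (PySem.List.pyGetD (PySem.List.pyGetD PU i []) j "")))
            else PU) PU) PU
    = PU.take k ++ (PU.drop k).map (List.map (pvTweak M2)) := by
  intro fuel
  induction fuel with
  | zero =>
    intro k n PU hf hl hk
    have : k = n := by omega
    subst this
    rw [PySem.List.pyRange_one_eq_nil le_rfl]
    simp only [List.foldl_nil]
    rw [← hl, List.take_length, List.drop_length, List.map_nil, List.append_nil]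
  | succ fuel ih =>
    intro k n PU hf hl hk
    by_cases hkn : k = n
    · subst hkn
      rw [PySem.List.pyRange_one_eq_nil le_rfl]
      simp only [List.foldl_nil]
      rw [← hl, List.take_length, List.drop_length, List.map_nil, List.append_nil]
    · have hklt : k < n := by omega
      have hkP : k < PU.length := by omega
      rw [PySem.List.pyRange_one_cons (by exact_mod_cast hklt)]
      rw [List.foldl_cons]
      have hgi : PySem.List.pyGetD PU (k : Int) [] = PU[k] := by
        rw [PySem.List.pyGetD_natCast, List.getD_eq_getElem _ _ hkP]
      have hstep := pv_innerAux M2 k (PU[k].length) 0 (PU[k].length) PU PU[k]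
        (by omega) (List.getElem?_eq_getElem hkP) rfl (Nat.zero_le _)
      have hzero : ((0:Nat) : Int) = (0 : Int) := by norm_num
      rw [hgi]
      rw [hzero] at hstep
      rw [hstep]
      simp only [List.take_zero, List.drop_zero, List.nil_append]
      have hcast : ((k : Int) + 1) = ((k + 1 : Nat) : Int) := by push_cast; ring
      rw [hcast]
      set PU' := PU.set k (PU[k].map (pvTweak M2)) with hPU'
      have := ih (k+1) n PU' (by omega) (by simp [hPU', hl]) (by omega)
      rw [this]
      have htake : PU'.take (k+1) = PU.take k ++ [PU[k].map (pvTweak M2)] := by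
        rw [hPU', List.set_eq_take_cons_drop _ hkP, List.take_append]
        simp [List.length_take, Nat.min_eq_left hkP.le]
      have hdrop : PU'.drop (k+1) = PU.drop (k+1) := by
        rw [hPU', List.drop_set_of_lt (by omega)]
      rw [htake, hdrop, List.append_assoc, List.singleton_append]
      rw [List.drop_eq_getElem_cons hkP, List.map_cons]

-- the whole mutation loop, started at 0, rewrites every row
theorem pv_outer0 (M2 : List String) (PU : List (List String)) :
    (PySem.List.pyRange 0 (PU.length : Int) 1).foldl
      (fun PU i =>
        (PySem.List.pyRange 0 ((PySem.List.pyGetD PU i []).length : Int) 1).foldl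
          (fun PU j =>
            if M2.contains (pvStrip (PySem.List.pyGetD (PySem.List.pyGetD PU i []) j "")) then
              pvSet PU i (pvSet (PySem.List.pyGetD PU i []) j
                (pvStrip (PySem.List.pyGetD (PySem.List.pyGetD PU i []) j "")))
            else PU) PU) PU
    = PU.map (List.map (pvTweak M2)) := by
  have h := pv_outerAux M2 PU.length 0 PU.length PU rfl rfl (Nat.zero_le _)
  simpa using h

-- B's sorted run-scan collects exactly the prefixes A's count==1 filter collects (as a membership test)
theorem pv_uniq_eq_M2_contains (Pr : List (List String)) (q : String) :
    (pvUniqRuns (PySem.List.sorted (pvM1 Pr) (fun x => x) false)).contains q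
    = (pvM2 Pr).contains q := by
  set sp := PySem.List.sorted (pvM1 Pr) (fun x => x) false with hsp
  have hpw : sp.Pairwise (· ≤ ·) := by
    have := PySem.List.sorted_pairwise (pvM1 Pr) (fun x => x)
    simpa using this
  have hperm : sp.Perm (pvM1 Pr) := PySem.List.sorted_perm (pvM1 Pr) (fun x => x) false
  have hmem : q ∈ pvUniqRuns sp ↔ (pvM1 Pr).count q = 1 := by
    rw [pvUniqRuns_mem q sp.length sp le_rfl hpw, hperm.count_eq]
  unfold pvM2
  rw [pv_contains_M2]
  by_cases h : (pvM1 Pr).count q = 1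
  · simp [List.contains_eq_mem, hmem, h]
  · simp [List.contains_eq_mem, hmem, h]

theorem PU__spec : Claim_equal_PU_ := by
  intro Pr _
  unfold Spec_PU_ PU_ PU__alt
  simp only [pvP_eq, pvPunti_eq, PySem.List.foldl_append_singleton_eq_map,
    PySem.List.foldl_append_if_eq_filter,
    List.nil_append, List.map_id_fun', List.map_id]
  rw [show (pvNum Pr).map pvStrip = pvM1 Pr from rfl]
  rw [show (pvM1 Pr).filter (fun x => (pvM1 Pr).count x == 1) = pvM2 Pr from rfl]
  have hlen : ((PySem.List.enumerate Pr 0).map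
      (fun p => p.2.map (fun q => q ++ PySem.Int.toStr (p.1 + 1)))).length = Pr.length := by
    simp [PySem.List.length_enumerate]
  rw [← hlen, pv_outer0 (pvM2 Pr)]
  rw [show ((PySem.List.enumerate Pr 0).flatMap
      (fun p => p.2.map (fun q => q ++ PySem.Int.toStr (p.1 + 1)))).map (fun s => pvStrip s)
      = pvM1 Pr from rfl]
  simp only [List.map_map]
  apply List.map_congr_left
  intro p _
  simp only [Function.comp_apply, List.map_map]
  apply List.map_congr_left
  intro s _
  simp only [Function.comp_apply]
  unfold pvTweak
  rw [pv_uniq_eq_M2_contains Pr]
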